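-- pv_equiv track=rewrite | github.com/Rakeshbag7/30-day-challenge-code-and-explanation | Problem Day 26 Chocolate game.py | chocolate_game
-- ===== SOURCE A (Python) =====
-- def chocolate_game(a, b):
--     steps = 0
--     while a > 0 and b > 0:
--         if a >= b:
--             steps += a // b
--             a %= b
--         else:
--             steps += b // a
--             b %= a
--     return steps
-- ===== SOURCE B (Python) =====
-- def chocolate_game(a, b):
--     if a <= 0 or b <= 0:
--         return 0
--     if a >= b:
--         return a // b + chocolate_game(a % b, b)
--     return b // a + chocolate_game(a, b % a)
-- ===== Notes on version B (the rewrite author's own statement) =====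
-- stated objective: alternative
-- what changed: Replaces the while-loop with a steps accumulator by direct recursion on the pair: each call returns the current quotient plus the recursive sum, with the same positivity guard and a>=b tie-break.
import Mathlib
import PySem

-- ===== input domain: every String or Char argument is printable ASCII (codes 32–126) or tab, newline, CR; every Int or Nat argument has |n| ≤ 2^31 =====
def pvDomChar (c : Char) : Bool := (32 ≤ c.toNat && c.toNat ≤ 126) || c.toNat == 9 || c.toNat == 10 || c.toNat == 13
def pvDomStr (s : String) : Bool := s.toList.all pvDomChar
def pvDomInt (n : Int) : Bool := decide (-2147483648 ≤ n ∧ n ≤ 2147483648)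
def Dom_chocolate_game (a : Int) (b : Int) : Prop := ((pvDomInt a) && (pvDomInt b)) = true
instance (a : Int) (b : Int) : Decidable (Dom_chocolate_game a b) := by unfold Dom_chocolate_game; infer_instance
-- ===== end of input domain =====

-- B replaces A's while-loop-with-accumulator by direct recursion on the pair (same Euclidean recurrence, same guards); proved equal on all inputs.


-- ===== PORT A =====
-- Loop of A: 'while a > 0 and b > 0', carrying the accumulator 'steps'.
def chocGameLoop (a : Int) (b : Int) (steps : Int) : Int :=
  if _h : a > 0 ∧ b > 0 then
    if a ≥ b then
      chocGameLoop (PySem.Int.mod a b) b (steps + PySem.Int.floordiv a b)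
    else
      chocGameLoop a (PySem.Int.mod b a) (steps + PySem.Int.floordiv b a)
  else steps
termination_by a.toNat + b.toNat
decreasing_by
  · have _h1 := PySem.Int.mod_nonneg a _h.2
    have h2 := PySem.Int.mod_lt a _h.2
    omega
  · have _h1 := PySem.Int.mod_nonneg b _h.1
    have h2 := PySem.Int.mod_lt b _h.1
    omega

def chocolate_game (a : Int) (b : Int) : Int := chocGameLoop a b 0

-- ===== PORT B =====
-- B: direct recursion, each call contributes its quotient.
def chocolate_game_alt (a : Int) (b : Int) : Int :=
  if a ≤ 0 ∨ b ≤ 0 then 0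
  else if a ≥ b then
    PySem.Int.floordiv a b + chocolate_game_alt (PySem.Int.mod a b) b
  else
    PySem.Int.floordiv b a + chocolate_game_alt a (PySem.Int.mod b a)
termination_by a.toNat + b.toNat
decreasing_by
  · have _h1 := PySem.Int.mod_nonneg a (by omega : (0:Int) < b)
    have h2 := PySem.Int.mod_lt a (by omega : (0:Int) < b)
    omega
  · have _h1 := PySem.Int.mod_nonneg b (by omega : (0:Int) < a)
    have h2 := PySem.Int.mod_lt b (by omega : (0:Int) < a)
    omega

-- ===== PRECONDITION & SPEC =====
def Spec_chocolate_game (a : Int) (b : Int) (out : Int) : Prop := out = chocolate_game_alt a b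
instance (a : Int) (b : Int) (out : Int) : Decidable (Spec_chocolate_game a b out) := by unfold Spec_chocolate_game; infer_instance

-- ===== CLAIM (what is proved, stated in full; the proofs are below) =====
def Claim_equal_chocolate_game : Prop := ∀ (a : Int) (b : Int), Dom_chocolate_game a b → Spec_chocolate_game a b (chocolate_game a b)

-- ===== LEMMAS AND PROOFS =====
theorem chocGameLoop_eq (a b s : Int) : chocGameLoop a b s = s + chocolate_game_alt a b := by
  induction a, b, s using chocGameLoop.induct with
  | case1 a b s h hab ih =>
    have hb : chocolate_game_alt a b
        = PySem.Int.floordiv a b + chocolate_game_alt (PySem.Int.mod a b) b := by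
      rw [chocolate_game_alt, if_neg (by omega), if_pos hab]
    rw [chocGameLoop, dif_pos h, if_pos hab, ih, hb]; ring
  | case2 a b s h hab ih =>
    have hb : chocolate_game_alt a b
        = PySem.Int.floordiv b a + chocolate_game_alt a (PySem.Int.mod b a) := by
      rw [chocolate_game_alt, if_neg (by omega), if_neg hab]
    rw [chocGameLoop, dif_pos h, if_neg hab, ih, hb]; ring
  | case3 a b s h =>
    rw [chocGameLoop, dif_neg h, chocolate_game_alt, if_pos (by omega)]
    ring

-- ===== VERDICT (by name: the statement is the Claim_ definition above) =====
theorem chocolate_game_spec : Claim_equal_chocolate_game := by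
  intro a b _
  unfold Spec_chocolate_game chocolate_game
  rw [chocGameLoop_eq]; ring
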